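-- pv_equiv track=rewrite | github.com/xzavierxu-pixel/crypto_engine | scripts/run_model_experiments.py | _resolve_variants
-- ===== SOURCE A (Python) =====
-- def _resolve_variants(
--     requested: str,
--     derivatives_frame_present: bool,
--     available_derivatives_sources: set[str] | None = None,
-- ) -> list[str]:
--     if requested != "auto":
--         return [name.strip() for name in requested.split(",") if name.strip()]
--
--     if not derivatives_frame_present:
--         return ["baseline"]
--
--     available = set(available_derivatives_sources) if available_derivatives_sources is not None else {
--         "funding",
--         "basis",
--         "book_ticker",
--         "oi",
--         "options",
--     }
--     variants = ["baseline"]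
--
--     if "funding" not in available:
--         return variants
--
--     variants.append("funding")
--     if "basis" not in available:
--         return variants
--
--     variants.append("funding_basis")
--     if "book_ticker" in available:
--         variants.append("funding_basis_book_ticker")
--         if "oi" in available:
--             variants.append("funding_basis_book_ticker_oi")
--             if "options" in available:
--                 variants.append("funding_basis_book_ticker_oi_options")
--         return variants
--
--     if "oi" in available:
--         variants.append("funding_basis_oi")
--         if "options" in available:
--             variants.append("funding_basis_oi_options")
--     return variants
-- ===== SOURCE B (Python) =====
-- def _resolve_variants(
--     requested: str,
--     derivatives_frame_present: bool,
--     available_derivatives_sources: set[str] | None = None,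
-- ) -> list[str]:
--     if requested != "auto":
--         return [name.strip() for name in requested.split(",") if name.strip()]
--
--     if not derivatives_frame_present:
--         return ["baseline"]
--
--     available = set(available_derivatives_sources) if available_derivatives_sources is not None else {
--         "funding",
--         "basis",
--         "book_ticker",
--         "oi",
--         "options",
--     }
--
--     if "funding" not in available:
--         return ["baseline"]
--     if "basis" not in available:
--         return ["baseline", "funding"]
--
--     components = ["funding", "basis"]
--     variants = ["baseline", "funding", "funding_basis"]
--     for source, enabled in (
--         ("book_ticker", "book_ticker" in available),
--         ("oi", "oi" in available),
--         ("options", "options" in available and "oi" in available),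
--     ):
--         if enabled:
--             components.append(source)
--             variants.append("_".join(components))
--     return variants
-- ===== Notes on version B (the rewrite author's own statement) =====
-- stated objective: simpler
-- what changed: The nested book_ticker/oi/options conditional tree (with hand-written joined name literals) is replaced by early-return gates plus one loop over an ordered table of optional sources and gates, maintaining a running components list and emitting '_'.join(components) for each enabled source.
import Mathlib
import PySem

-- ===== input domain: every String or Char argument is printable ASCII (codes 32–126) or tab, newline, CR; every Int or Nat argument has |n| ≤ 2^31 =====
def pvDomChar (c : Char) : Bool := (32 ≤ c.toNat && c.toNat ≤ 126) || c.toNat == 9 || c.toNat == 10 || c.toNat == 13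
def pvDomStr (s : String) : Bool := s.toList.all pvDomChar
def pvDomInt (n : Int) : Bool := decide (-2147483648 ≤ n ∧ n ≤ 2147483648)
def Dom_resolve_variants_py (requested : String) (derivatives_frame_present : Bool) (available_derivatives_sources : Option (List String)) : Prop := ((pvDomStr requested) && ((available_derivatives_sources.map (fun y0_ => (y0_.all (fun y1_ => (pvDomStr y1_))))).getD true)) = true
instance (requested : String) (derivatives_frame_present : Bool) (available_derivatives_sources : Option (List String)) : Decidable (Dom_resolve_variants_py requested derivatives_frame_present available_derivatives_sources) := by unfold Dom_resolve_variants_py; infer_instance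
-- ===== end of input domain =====

-- Header: B replaces A's nested book_ticker/oi/options conditional tree by a single
-- loop over an ordered table of optional sources with gates, building variant names
-- with '_'.join of a running components list (objective: simpler decomposition).

-- ===== PORT A =====
-- shared context: Python's `set(available_derivatives_sources) if available_derivatives_sources is not None else {...}`
def pvAvailable (available_derivatives_sources : Option (List String)) : PySem.Set String :=
  match available_derivatives_sources with
  | some xs => PySem.Set.ofList xs
  | none => PySem.Set.ofList ["funding", "basis", "book_ticker", "oi", "options"]

def resolve_variants_py (requested : String) (derivatives_frame_present : Bool) (available_derivatives_sources : Option (List String)) : List String :=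
  if requested != "auto" then
    (((PySem.Str.split? requested ",").getD []).filter (fun name => PySem.Str.strip name != "")).map (fun name => PySem.Str.strip name)
  else if !derivatives_frame_present then ["baseline"]
  else
    let available := pvAvailable available_derivatives_sources
    let variants := ["baseline"]
    if !(PySem.Set.contains available "funding") then variants
    else
      let variants := variants ++ ["funding"]
      if !(PySem.Set.contains available "basis") then variants
      else
        let variants := variants ++ ["funding_basis"]
        if PySem.Set.contains available "book_ticker" then
          let variants := variants ++ ["funding_basis_book_ticker"]
          if PySem.Set.contains available "oi" then
            let variants := variants ++ ["funding_basis_book_ticker_oi"]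
            if PySem.Set.contains available "options" then
              variants ++ ["funding_basis_book_ticker_oi_options"]
            else variants
          else variants
        else
          if PySem.Set.contains available "oi" then
            let variants := variants ++ ["funding_basis_oi"]
            if PySem.Set.contains available "options" then
              variants ++ ["funding_basis_oi_options"]
            else variants
          else variants

-- ===== PORT B =====
def resolve_variants_py_alt (requested : String) (derivatives_frame_present : Bool) (available_derivatives_sources : Option (List String)) : List String :=
  if requested != "auto" then
    (((PySem.Str.split? requested ",").getD []).filter (fun name => PySem.Str.strip name != "")).map (fun name => PySem.Str.strip name)
  else if !derivatives_frame_present then ["baseline"]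
  else
    let available := pvAvailable available_derivatives_sources
    if !(PySem.Set.contains available "funding") then ["baseline"]
    else if !(PySem.Set.contains available "basis") then ["baseline", "funding"]
    else
      let table : List (String × Bool) :=
        [("book_ticker", PySem.Set.contains available "book_ticker"),
         ("oi", PySem.Set.contains available "oi"),
         ("options", PySem.Set.contains available "options" && PySem.Set.contains available "oi")]
      (table.foldl
        (fun (st : List String × List String) p =>
          if p.2 then (st.1 ++ [p.1], st.2 ++ [PySem.Str.join "_" (st.1 ++ [p.1])]) else st)
        (["funding", "basis"], ["baseline", "funding", "funding_basis"])).2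

-- ===== PRECONDITION & SPEC =====
def Spec_resolve_variants_py (requested : String) (derivatives_frame_present : Bool) (available_derivatives_sources : Option (List String)) (out : List String) : Prop := out = resolve_variants_py_alt requested derivatives_frame_present available_derivatives_sources
instance (requested : String) (derivatives_frame_present : Bool) (available_derivatives_sources : Option (List String)) (out : List String) : Decidable (Spec_resolve_variants_py requested derivatives_frame_present available_derivatives_sources out) := by unfold Spec_resolve_variants_py; infer_instance

-- ===== CLAIM (what is proved, stated in full; the proofs are below) =====
def Claim_equal_resolve_variants_py : Prop := ∀ (requested : String) (derivatives_frame_present : Bool) (available_derivatives_sources : Option (List String)), Dom_resolve_variants_py requested derivatives_frame_present available_derivatives_sources → Spec_resolve_variants_py requested derivatives_frame_present available_derivatives_sources (resolve_variants_py requested derivatives_frame_present available_derivatives_sources)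

-- ===== LEMMAS AND PROOFS =====
-- On the "auto", frame-present path both programs depend only on the five membership tests.
lemma pv_auto_eq (o : Option (List String)) :
    resolve_variants_py "auto" true o = resolve_variants_py_alt "auto" true o := by
  simp only [resolve_variants_py, resolve_variants_py_alt]
  generalize pvAvailable o = avail
  generalize PySem.Set.contains avail "funding" = f
  generalize PySem.Set.contains avail "basis" = b
  generalize PySem.Set.contains avail "book_ticker" = bt
  generalize PySem.Set.contains avail "oi" = oi
  generalize PySem.Set.contains avail "options" = op
  cases f <;> cases b <;> cases bt <;> cases oi <;> cases op <;> rfl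

-- ===== VERDICT (by name: the statement is the Claim_ definition above) =====
theorem resolve_variants_py_spec : Claim_equal_resolve_variants_py := by
  intro requested dfp o _
  unfold Spec_resolve_variants_py
  by_cases h : requested = "auto"
  · subst h
    cases dfp
    · rfl
    · exact pv_auto_eq o
  · simp [resolve_variants_py, resolve_variants_py_alt, h]
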